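-- pv_equiv track=rewrite | github.com/KaiHsiangHuang/London-EUS-PA-Predictive-Model | London EUS PA Predictive Model.py | calculate_hourly_coverage
-- ===== SOURCE A (Python) =====
-- OPERATIONAL_HOURS_WEEKDAY = [
--     '07:00', '08:00', '09:00', '10:00', '11:00', '12:00', '13:00',
--     '14:00', '15:00', '16:00', '17:00', '18:00', '19:00', '20:00',
--     '21:00', '22:00', '23:00'
-- ]
--
-- OPERATIONAL_HOURS_SUNDAY = [
--     '08:00', '09:00', '10:00', '11:00', '12:00', '13:00',
--     '14:00', '15:00', '16:00', '17:00', '18:00', '19:00', '20:00',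
--     '21:00', '22:00', '23:00'
-- ]
--
-- def time_to_minutes(time_str):
--     """Convert HH:MM time string to minutes since midnight."""
--     if not time_str or ':' not in time_str:
--         return 0
--
--     try:
--         hours, minutes = map(int, time_str.split(':'))
--         return hours * 60 + minutes
--     except:
--         return 0
--
-- def get_operational_hours(day_of_week):
--     """Get operational hours based on day of week."""
--     if day_of_week == 'Sunday':
--         return OPERATIONAL_HOURS_SUNDAY
--     else:
--         return OPERATIONAL_HOURS_WEEKDAY
--
-- def calculate_hourly_coverage(roster_data, selected_day):
--     """Calculate hourly staff coverage for a given day with improved time handling."""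
--     if not roster_data or selected_day not in roster_data:
--         operational_hours = get_operational_hours(selected_day)
--         return {hour: 0 for hour in operational_hours}
--
--     operational_hours = get_operational_hours(selected_day)
--     coverage = {hour: 0 for hour in operational_hours}
--
--     for start_time, end_time in roster_data[selected_day]:
--         # Convert times to minutes for accurate comparison
--         start_minutes = time_to_minutes(start_time)
--         end_minutes = time_to_minutes(end_time)
--
--         # Count staff for each operational hour
--         for hour_str in operational_hours:
--             hour_minutes = time_to_minutes(hour_str)
--
--             # Check if this hour falls within the shift
--             # A shift covers an hour if the hour is >= start and < end
--             if start_minutes <= hour_minutes < end_minutes: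
--                 coverage[hour_str] += 1
--
--     return coverage
-- ===== SOURCE B (Python) =====
-- # B: difference-array sweep over shift boundary indices + prefix sum, instead of
-- # incrementing every covered hour per shift.
--
-- OPERATIONAL_HOURS_WEEKDAY = [
--     '07:00', '08:00', '09:00', '10:00', '11:00', '12:00', '13:00',
--     '14:00', '15:00', '16:00', '17:00', '18:00', '19:00', '20:00',
--     '21:00', '22:00', '23:00'
-- ]
--
-- OPERATIONAL_HOURS_SUNDAY = [
--     '08:00', '09:00', '10:00', '11:00', '12:00', '13:00',
--     '14:00', '15:00', '16:00', '17:00', '18:00', '19:00', '20:00',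
--     '21:00', '22:00', '23:00'
-- ]
--
-- def time_to_minutes(time_str):
--     if not time_str or ':' not in time_str:
--         return 0
--     try:
--         hours, minutes = map(int, time_str.split(':'))
--         return hours * 60 + minutes
--     except:
--         return 0
--
-- def get_operational_hours(day_of_week):
--     if day_of_week == 'Sunday':
--         return OPERATIONAL_HOURS_SUNDAY
--     else:
--         return OPERATIONAL_HOURS_WEEKDAY
--
-- def calculate_hourly_coverage(roster_data, selected_day):
--     operational_hours = get_operational_hours(selected_day)
--     if not roster_data or selected_day not in roster_data:
--         return {hour: 0 for hour in operational_hours}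
--
--     hour_minutes = [time_to_minutes(h) for h in operational_hours]
--     n = len(hour_minutes)
--     diff = [0] * (n + 1)
--     for start_time, end_time in roster_data[selected_day]:
--         start_minutes = time_to_minutes(start_time)
--         end_minutes = time_to_minutes(end_time)
--         # boundary indices: first hour >= start, first hour >= end
--         lo = sum(1 for m in hour_minutes if m < start_minutes)
--         hi = sum(1 for m in hour_minutes if m < end_minutes)
--         if lo < hi:
--             diff[lo] += 1
--             diff[hi] -= 1
--
--     counts = []
--     running = 0
--     for i in range(n):
--         running += diff[i]
--         counts.append(running)
--     return dict(zip(operational_hours, counts))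
-- ===== Notes on version B (the rewrite author's own statement) =====
-- stated objective: alternative
-- what changed: Replaces the per-shift scan that increments a dict entry for every covered hour with a boundary sweep: each shift contributes +1/-1 at its first/last covered hour index in a difference array, and a single prefix-sum pass produces all hourly counts.
import Mathlib
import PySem

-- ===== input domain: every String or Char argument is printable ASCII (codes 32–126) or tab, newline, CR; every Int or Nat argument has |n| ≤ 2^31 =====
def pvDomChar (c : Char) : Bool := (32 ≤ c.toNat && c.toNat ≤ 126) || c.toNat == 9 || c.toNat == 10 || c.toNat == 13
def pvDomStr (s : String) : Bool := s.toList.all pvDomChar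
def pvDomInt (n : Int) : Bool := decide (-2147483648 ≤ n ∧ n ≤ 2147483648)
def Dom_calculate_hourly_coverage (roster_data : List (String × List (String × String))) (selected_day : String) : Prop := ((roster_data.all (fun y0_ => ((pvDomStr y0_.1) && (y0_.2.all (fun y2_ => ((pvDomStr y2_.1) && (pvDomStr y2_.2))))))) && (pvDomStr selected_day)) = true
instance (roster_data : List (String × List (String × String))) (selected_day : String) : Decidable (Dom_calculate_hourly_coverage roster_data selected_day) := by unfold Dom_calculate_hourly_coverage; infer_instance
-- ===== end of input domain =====

-- B replaces A's per-shift loop over every covered hour (dict increments) by a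
-- difference-array sweep: +1/-1 at each shift's boundary hour indices, then one
-- prefix-sum pass; same results, different algorithm (objective: alternative).

-- ===== PORT A =====
def OPERATIONAL_HOURS_WEEKDAY : List String :=
  ["07:00", "08:00", "09:00", "10:00", "11:00", "12:00", "13:00",
   "14:00", "15:00", "16:00", "17:00", "18:00", "19:00", "20:00",
   "21:00", "22:00", "23:00"]

def OPERATIONAL_HOURS_SUNDAY : List String :=
  ["08:00", "09:00", "10:00", "11:00", "12:00", "13:00",
   "14:00", "15:00", "16:00", "17:00", "18:00", "19:00", "20:00",
   "21:00", "22:00", "23:00"]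

-- time_to_minutes: "a, b = map(int, s.split(':'))" returns h*60+m only when the
-- split has exactly two int-parsable pieces; every raised ValueError is caught → 0.
def time_to_minutes (time_str : String) : Int :=
  if time_str = "" ∨ PySem.Str.isIn ":" time_str = false then 0
  else
    match (PySem.Str.split? time_str ":").getD [] with
    | [a, b] =>
      match PySem.Int.ofStr? a, PySem.Int.ofStr? b with
      | some h, some m => h * 60 + m
      | _, _ => 0
    | _ => 0

def get_operational_hours (day_of_week : String) : List String :=
  if day_of_week = "Sunday" then OPERATIONAL_HOURS_SUNDAY else OPERATIONAL_HOURS_WEEKDAY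

def calculate_hourly_coverage (roster_data : List (String × List (String × String))) (selected_day : String) : List (String × Int) :=
  if roster_data = [] ∨ (PySem.Dict.mk roster_data).contains selected_day = false then
    let operational_hours := get_operational_hours selected_day
    (operational_hours.foldl (fun d h => d.insert h (0 : Int)) PySem.Dict.empty).items
  else
    let operational_hours := get_operational_hours selected_day
    let coverage := operational_hours.foldl (fun d h => d.insert h (0 : Int)) PySem.Dict.empty
    let shifts := (PySem.Dict.mk roster_data).getD selected_day []
    (shifts.foldl (fun cov p =>
        let start_minutes := time_to_minutes p.1
        let end_minutes := time_to_minutes p.2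
        operational_hours.foldl (fun cov h =>
          let hour_minutes := time_to_minutes h
          if start_minutes ≤ hour_minutes ∧ hour_minutes < end_minutes then
            cov.modify h 0 (· + 1)
          else cov) cov) coverage).items

-- ===== PORT B =====
def calculate_hourly_coverage_alt (roster_data : List (String × List (String × String))) (selected_day : String) : List (String × Int) :=
  let operational_hours := get_operational_hours selected_day
  if roster_data = [] ∨ (PySem.Dict.mk roster_data).contains selected_day = false then
    (operational_hours.foldl (fun d h => d.insert h (0 : Int)) PySem.Dict.empty).items
  else
    let hour_minutes := operational_hours.map time_to_minutes
    let n := hour_minutes.length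
    let diff0 : List Int := List.replicate (n + 1) 0
    let diff := ((PySem.Dict.mk roster_data).getD selected_day []).foldl (fun d p =>
        let start_minutes := time_to_minutes p.1
        let end_minutes := time_to_minutes p.2
        let lo : Int := hour_minutes.foldl (fun acc m => if m < start_minutes then acc + 1 else acc) 0
        let hi : Int := hour_minutes.foldl (fun acc m => if m < end_minutes then acc + 1 else acc) 0
        if lo < hi then
          let d1 := PySem.List.pySetD d lo (PySem.List.pyGetD d lo 0 + 1)
          PySem.List.pySetD d1 hi (PySem.List.pyGetD d1 hi 0 - 1)
        else d) diff0
    let counts := ((PySem.List.pyRange 0 (n : Int) 1).foldl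
        (fun (acc : List Int × Int) i =>
          let running := acc.2 + PySem.List.pyGetD diff i 0
          (acc.1 ++ [running], running)) (([] : List Int), (0 : Int))).1
    operational_hours.zip counts

-- ===== PRECONDITION & SPEC =====
def Spec_calculate_hourly_coverage (roster_data : List (String × List (String × String))) (selected_day : String) (out : List (String × Int)) : Prop := out = calculate_hourly_coverage_alt roster_data selected_day
instance (roster_data : List (String × List (String × String))) (selected_day : String) (out : List (String × Int)) : Decidable (Spec_calculate_hourly_coverage roster_data selected_day out) := by unfold Spec_calculate_hourly_coverage; infer_instance

-- ===== CLAIM (what is proved, stated in full; the proofs are below) =====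
def Claim_equal_calculate_hourly_coverage : Prop := ∀ (roster_data : List (String × List (String × String))) (selected_day : String), Dom_calculate_hourly_coverage roster_data selected_day → Spec_calculate_hourly_coverage roster_data selected_day (calculate_hourly_coverage roster_data selected_day)

-- ===== LEMMAS AND PROOFS =====

-- the canonical per-hour count both programs compute
def pvCovers (h : String) (p : String × String) : Bool :=
  decide (time_to_minutes p.1 ≤ time_to_minutes h ∧ time_to_minutes h < time_to_minutes p.2)

theorem pv_oh_nodup (day : String) : (get_operational_hours day).Nodup := by
  unfold get_operational_hours; split <;> decide

theorem pv_hm_sorted (day : String) :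
    ((get_operational_hours day).map time_to_minutes).Pairwise (· ≤ ·) := by
  unfold get_operational_hours; split <;> decide

-- ---- dicts keyed by a Nodup list, described as maps ----

theorem pv_getD_mk_map (f : String → Int) :
    ∀ (oh : List String), oh.Nodup → ∀ h ∈ oh,
      (PySem.Dict.mk (oh.map (fun x => (x, f x)))).getD h 0 = f h := by
  intro oh
  induction oh with
  | nil => intro _ h hm; cases hm
  | cons a t ih =>
    intro hnd h hm
    rw [PySem.Dict.getD_eq_get?_getD]
    simp only [List.map_cons, PySem.Dict.get?_mk_cons]
    by_cases hah : a = h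
    · subst hah; simp
    · simp only [beq_iff_eq, hah, if_false]
      rw [← PySem.Dict.getD_eq_get?_getD]
      have hht : h ∈ t := by
        rcases List.mem_cons.mp hm with h1 | h2
        · exact absurd h1.symm hah
        · exact h2
      exact ih hnd.of_cons h hht

theorem pv_items_eq_keys_map (d : PySem.Dict String Int) (hk : d.keys.Nodup) :
    d.items = d.keys.map (fun k => (k, d.getD k 0)) := by
  obtain ⟨l⟩ := d
  simp only [PySem.Dict.keys_mk, List.map_map] at *
  show l = l.map (fun p => (p.1, PySem.Dict.getD ⟨l⟩ p.1 0))
  conv_lhs => rw [← List.map_id l]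
  symm
  apply List.map_congr_left
  intro p hp
  have : (PySem.Dict.mk l).get? p.1 = some p.2 := by
    apply PySem.Dict.get?_of_mem_items
    · show (p.1, p.2) ∈ l; simpa using hp
    · simpa [PySem.Dict.keys_mk] using hk
  simp [PySem.Dict.getD_eq_get?_getD, this]

theorem pv_dict_eq (d d' : PySem.Dict String Int) (h1 : d.keys.Nodup)
    (hkeys : d.keys = d'.keys) (hval : ∀ k ∈ d.keys, d.getD k 0 = d'.getD k 0) :
    d = d' := by
  apply PySem.Dict.ext
  rw [pv_items_eq_keys_map d h1, pv_items_eq_keys_map d' (hkeys ▸ h1), ← hkeys]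
  exact List.map_congr_left (fun k hk => by rw [hval k hk])

theorem pv_keys_mk_map (f : String → Int) (oh : List String) :
    (PySem.Dict.mk (oh.map (fun x => (x, f x)))).keys = oh := by
  simp [PySem.Dict.keys_mk, Function.comp_def]

theorem pv_modify_mk_map (oh : List String) (hnd : oh.Nodup) (k : String) (hk : k ∈ oh)
    (f : String → Int) :
    (PySem.Dict.mk (oh.map (fun h => (h, f h)))).modify k 0 (· + 1)
      = PySem.Dict.mk (oh.map (fun h => (h, if h = k then f h + 1 else f h))) := by
  apply pv_dict_eq
  · rw [PySem.Dict.keys_modify, PySem.Dict.keys_insert_of_contains, pv_keys_mk_map]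
    · exact hnd
    · rw [(PySem.Dict.contains_iff_mem_keys _ _), pv_keys_mk_map]; exact hk
  · rw [PySem.Dict.keys_modify, PySem.Dict.keys_insert_of_contains, pv_keys_mk_map, pv_keys_mk_map]
    rw [(PySem.Dict.contains_iff_mem_keys _ _), pv_keys_mk_map]; exact hk
  · intro j hj
    rw [PySem.Dict.keys_modify, PySem.Dict.keys_insert_of_contains, pv_keys_mk_map] at hj
    · rw [PySem.Dict.getD_modify, pv_getD_mk_map _ oh hnd j hj,
        pv_getD_mk_map _ oh hnd j hj, pv_getD_mk_map _ oh hnd k hk]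
      split_ifs with hjk
      · rw [hjk]
      · rfl
    · rw [(PySem.Dict.contains_iff_mem_keys _ _), pv_keys_mk_map]; exact hk

-- ---- A's inner loop over the hours ----

theorem pv_inner_fold (oh : List String) (hnd : oh.Nodup) (c : String → Prop)
    [DecidablePred c] :
    ∀ (L : List String), (∀ h ∈ L, h ∈ oh) → ∀ (f : String → Int),
      L.foldl (fun cov h => if c h then cov.modify h 0 (· + 1) else cov)
          (PySem.Dict.mk (oh.map (fun h => (h, f h))))
        = PySem.Dict.mk (oh.map (fun h =>
            (h, f h + ((L.filter (fun x => decide (c x))).count h : Int)))) := by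
  intro L
  induction L with
  | nil => intro _ f; simp
  | cons x t ih =>
    intro hsub f
    by_cases hc : c x
    · simp only [List.foldl_cons, if_pos hc,
        pv_modify_mk_map oh hnd x (hsub x (List.mem_cons_self)) f]
      rw [ih (fun h hh => hsub h (List.mem_cons_of_mem _ hh))]
      congr 1
      apply List.map_congr_left
      intro h _
      have hfilter : (x :: t).filter (fun y => decide (c y)) = x :: t.filter (fun y => decide (c y)) := by
        simp [hc]
      rw [hfilter]
      rcases eq_or_ne h x with he | he
      · subst he
        simp only [if_pos rfl, List.count_cons_self, Prod.mk.injEq, true_and]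
        push_cast; ring
      · simp only [if_neg he, Prod.mk.injEq, true_and, List.count_cons]
        simp [he, Ne.symm he]
    · simp only [List.foldl_cons, if_neg hc]
      rw [ih (fun h hh => hsub h (List.mem_cons_of_mem _ hh))]
      congr 1
      apply List.map_congr_left
      intro h _
      have hfilter : (x :: t).filter (fun y => decide (c y)) = t.filter (fun y => decide (c y)) := by
        simp [hc]
      rw [hfilter]

theorem pv_count_filter_nodup (oh : List String) (hnd : oh.Nodup) (c : String → Prop)
    [DecidablePred c] (h : String) (hh : h ∈ oh) :
    ((oh.filter (fun x => decide (c x))).count h : Int) = if c h then 1 else 0 := by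
  by_cases hc : c h
  · rw [List.count_filter (by simpa using hc), if_pos hc]
    norm_cast
    exact List.count_eq_one_of_mem hnd hh
  · rw [if_neg hc]
    norm_cast
    rw [List.count_eq_zero]
    intro hmem
    exact hc (by simpa using (List.mem_filter.mp hmem).2)

-- ---- A's outer loop over the shifts ----

theorem pv_A_main (oh : List String) (hnd : oh.Nodup) :
    ∀ (shifts : List (String × String)) (f : String → Int),
      shifts.foldl (fun cov p =>
          oh.foldl (fun cov h =>
            if time_to_minutes p.1 ≤ time_to_minutes h ∧ time_to_minutes h < time_to_minutes p.2 then
              cov.modify h 0 (· + 1)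
            else cov) cov)
        (PySem.Dict.mk (oh.map (fun h => (h, f h))))
      = PySem.Dict.mk (oh.map (fun h => (h, f h + (shifts.countP (pvCovers h) : Int)))) := by
  intro shifts
  induction shifts with
  | nil => intro f; simp
  | cons p t ih =>
    intro f
    simp only [List.foldl_cons]
    rw [pv_inner_fold oh hnd
      (fun h => time_to_minutes p.1 ≤ time_to_minutes h ∧ time_to_minutes h < time_to_minutes p.2)
      oh (fun _ hh => hh) f]
    rw [ih]
    congr 1
    apply List.map_congr_left
    intro h hh
    rw [pv_count_filter_nodup oh hnd _ h hh]
    simp only [List.countP_cons, pvCovers]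
    by_cases hc : time_to_minutes p.1 ≤ time_to_minutes h ∧ time_to_minutes h < time_to_minutes p.2 <;>
      simp [hc] <;> push_cast <;> omega

theorem pv_dict_init (oh : List String) (hnd : oh.Nodup) :
    (oh.foldl (fun d h => d.insert h (0 : Int)) PySem.Dict.empty)
      = PySem.Dict.mk (oh.map (fun h => (h, (0 : Int)))) := by
  apply PySem.Dict.ext
  have := PySem.Dict.items_foldl_insert_fresh (κ := String) (ν := Int) oh (fun a => a)
    (fun _ => (0 : Int)) PySem.Dict.empty (fun a _ => by simp [PySem.Dict.contains_empty])
    (by simpa using hnd)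
  simpa [PySem.Dict.empty] using this

-- ---- B: sums of prefixes through a set ----

theorem pv_sum_take_set (v : Int) :
    ∀ (d : List Int) (j m : Nat),
      ((d.set j v).take m).sum
        = (d.take m).sum + (if j < m ∧ j < d.length then v - d.getD j 0 else 0) := by
  intro d
  induction d with
  | nil => intro j m; simp
  | cons a t ih =>
    intro j m
    cases j with
    | zero =>
      cases m with
      | zero => simp
      | succ m' =>
        simp only [List.set_cons_zero, List.take_succ_cons, List.sum_cons, List.length_cons,
          List.getD_cons_zero]
        rw [if_pos (by omega : 0 < m' + 1 ∧ 0 < t.length + 1)]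
        ring
    | succ j' =>
      cases m with
      | zero => simp
      | succ m' =>
        simp only [List.set_cons_succ, List.take_succ_cons, List.sum_cons,
          List.length_cons, List.getD_cons_succ]
        rw [ih j' m']
        by_cases hc : j' < m' ∧ j' < t.length
        · rw [if_pos hc, if_pos (by omega : j' + 1 < m' + 1 ∧ j' + 1 < t.length + 1)]; ring
        · rw [if_neg hc, if_neg (by omega : ¬(j' + 1 < m' + 1 ∧ j' + 1 < t.length + 1))]; ring

theorem pv_getD_set_ne (d : List Int) (i j : Nat) (v : Int) (hne : i ≠ j) :
    (d.set i v).getD j 0 = d.getD j 0 := by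
  simp [List.getD_eq_getElem?_getD, List.getElem?_set_ne hne]

-- ---- B: the difference-array loop, characterised by its prefix sums ----

theorem pv_B_diff (hm : List Int) (n : Nat) (hn : n = hm.length) :
    ∀ (shifts : List (String × String)) (d : List Int), d.length = n + 1 → ∀ (i : Nat), i < n →
      (((shifts.foldl (fun d p =>
          let start_minutes := time_to_minutes p.1
          let end_minutes := time_to_minutes p.2
          let lo : Int := hm.foldl (fun acc m => if m < start_minutes then acc + 1 else acc) 0
          let hi : Int := hm.foldl (fun acc m => if m < end_minutes then acc + 1 else acc) 0
          if lo < hi then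
            let d1 := PySem.List.pySetD d lo (PySem.List.pyGetD d lo 0 + 1)
            PySem.List.pySetD d1 hi (PySem.List.pyGetD d1 hi 0 - 1)
          else d) d).take (i + 1)).sum)
        = ((d.take (i + 1)).sum)
          + (shifts.countP (fun p =>
              decide ((hm.countP (fun m => decide (m < time_to_minutes p.1))) ≤ i
                ∧ i < (hm.countP (fun m => decide (m < time_to_minutes p.2))))) : Int) := by
  intro shifts
  induction shifts with
  | nil => intro d _ i _; simp
  | cons p t ih =>
    intro d hd i hi
    dsimp only at ih ⊢
    set L : Nat := hm.countP (fun m => decide (m < time_to_minutes p.1)) with hL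
    set H : Nat := hm.countP (fun m => decide (m < time_to_minutes p.2)) with hH
    have hlo : (hm.foldl (fun acc m => if m < time_to_minutes p.1 then acc + 1 else acc) (0 : Int)) = (L : Int) := by
      rw [PySem.List.foldl_ite_add_one, ← hL]; exact zero_add _
    have hhi : (hm.foldl (fun acc m => if m < time_to_minutes p.2 then acc + 1 else acc) (0 : Int)) = (H : Int) := by
      rw [PySem.List.foldl_ite_add_one, ← hH]; exact zero_add _
    have hLlen : L ≤ hm.length := by rw [hL]; exact List.countP_le_length
    have hHlen : H ≤ hm.length := by rw [hH]; exact List.countP_le_length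
    rw [List.foldl_cons, List.countP_cons]
    simp only [hlo, hhi, decide_eq_true_eq]
    rw [← hL, ← hH]
    by_cases hLH : (L : Int) < (H : Int)
    · have hLHn : L < H := by exact_mod_cast hLH
      rw [if_pos hLH]
      simp only [PySem.List.pySetD_natCast, PySem.List.pyGetD_natCast]
      have hgd1 : (d.set L (d.getD L 0 + 1)).getD H 0 = d.getD H 0 :=
        pv_getD_set_ne d L H _ (by omega)
      have hd1len : ((d.set L (d.getD L 0 + 1)).set H ((d.set L (d.getD L 0 + 1)).getD H 0 - 1)).length = n + 1 := by
        simp [hd]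
      rw [ih _ hd1len i hi]
      rw [pv_sum_take_set, pv_sum_take_set]
      simp only [List.length_set, hd, hgd1]
      by_cases hLi : L ≤ i
      · by_cases hHi : i < H
        · rw [if_pos (show L < i + 1 ∧ L < n + 1 by omega),
            if_neg (show ¬(H < i + 1 ∧ H < n + 1) by omega),
            if_pos (show L ≤ i ∧ i < H from ⟨hLi, hHi⟩)]
          push_cast; ring
        · rw [if_pos (show L < i + 1 ∧ L < n + 1 by omega),
            if_pos (show H < i + 1 ∧ H < n + 1 by omega),
            if_neg (show ¬(L ≤ i ∧ i < H) by omega)]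
          push_cast; ring
      · rw [if_neg (show ¬(L < i + 1 ∧ L < n + 1) by omega),
          if_neg (show ¬(H < i + 1 ∧ H < n + 1) by omega),
          if_neg (show ¬(L ≤ i ∧ i < H) by omega)]
        push_cast; ring
    · rw [if_neg hLH]
      rw [ih _ hd i hi]
      have hHL : H ≤ L := by exact_mod_cast not_lt.mp hLH
      rw [if_neg (show ¬(L ≤ i ∧ i < H) by omega)]
      push_cast; ring

-- ---- B: the running prefix-sum loop ----

theorem pv_sum_take_succ (D : List Int) : ∀ (n : Nat),
    (D.take (n + 1)).sum = (D.take n).sum + D.getD n 0 := by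
  induction D with
  | nil => intro n; simp
  | cons a t ih =>
    intro n
    cases n with
    | zero => simp [List.getD]
    | succ n' => simp only [List.take_succ_cons, List.sum_cons, ih n', List.getD_cons_succ]; ring

theorem pv_B_counts (D : List Int) : ∀ (n : Nat),
    ((PySem.List.pyRange 0 (n : Int) 1).foldl
        (fun (acc : List Int × Int) i =>
          (acc.1 ++ [acc.2 + PySem.List.pyGetD D i 0], acc.2 + PySem.List.pyGetD D i 0))
        (([] : List Int), (0 : Int)))
      = ((List.range n).map (fun i => (D.take (i + 1)).sum), (D.take n).sum) := by
  intro n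
  induction n with
  | zero => simp [PySem.List.pyRange_zero_natCast]
  | succ n' ih =>
    have hsplit : PySem.List.pyRange 0 ((n' + 1 : Nat) : Int) 1
        = PySem.List.pyRange 0 (n' : Int) 1 ++ [(n' : Int)] := by
      push_cast
      exact PySem.List.pyRange_one_succ_right (by positivity)
    rw [hsplit, List.foldl_append, ih]
    simp only [List.foldl_cons, List.foldl_nil, PySem.List.pyGetD_natCast]
    rw [List.range_succ, List.map_append]
    simp [pv_sum_take_succ D n']

-- ---- sorted count characterisation: boundary index vs hour value ----

theorem pv_sorted_countP_le_iff :
    ∀ (l : List Int), l.Pairwise (· ≤ ·) → ∀ (i : Nat) (hi : i < l.length) (x : Int),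
      (l.countP (fun m => decide (m < x)) ≤ i ↔ x ≤ l[i]) := by
  intro l
  induction l with
  | nil => intro _ i hi; simp at hi
  | cons a t ih =>
    intro hp i hi x
    have hat : ∀ b ∈ t, a ≤ b := fun b hb => List.rel_of_pairwise_cons hp hb
    have hpt : t.Pairwise (· ≤ ·) := hp.of_cons
    rw [List.countP_cons]
    by_cases hax : a < x
    · rw [if_pos (by simp [hax])]
      cases i with
      | zero => simp only [List.getElem_cons_zero]; omega
      | succ i' =>
        have hi' : i' < t.length := by simpa using hi
        simp only [List.getElem_cons_succ]
        have := ih hpt i' hi' x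
        omega
    · rw [if_neg (by simp [hax])]
      have hcount0 : t.countP (fun m => decide (m < x)) = 0 := by
        rw [List.countP_eq_zero]
        intro b hb
        have := hat b hb
        simp only [decide_eq_true_eq]
        omega
      cases i with
      | zero => simp only [List.getElem_cons_zero]; omega
      | succ i' =>
        have hi' : i' < t.length := by simpa using hi
        simp only [List.getElem_cons_succ]
        have hmem := hat (t[i']'hi') (List.getElem_mem hi')
        omega

-- ---- assembling both main branches into the same canonical list ----

theorem pv_A_branch (day : String) (shifts : List (String × String)) :
    (shifts.foldl (fun cov p =>
        let start_minutes := time_to_minutes p.1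
        let end_minutes := time_to_minutes p.2
        (get_operational_hours day).foldl (fun cov h =>
          let hour_minutes := time_to_minutes h
          if start_minutes ≤ hour_minutes ∧ hour_minutes < end_minutes then
            cov.modify h 0 (· + 1)
          else cov) cov)
      ((get_operational_hours day).foldl (fun d h => d.insert h (0 : Int)) PySem.Dict.empty)).items
    = (get_operational_hours day).map (fun h => (h, (shifts.countP (pvCovers h) : Int))) := by
  rw [pv_dict_init _ (pv_oh_nodup day)]
  rw [pv_A_main (get_operational_hours day) (pv_oh_nodup day) shifts (fun _ => 0)]
  show (get_operational_hours day).map (fun h => (h, 0 + (shifts.countP (pvCovers h) : Int))) = _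
  simp

theorem pv_B_branch (day : String) (shifts : List (String × String)) :
    (let hour_minutes := (get_operational_hours day).map time_to_minutes
    let n := hour_minutes.length
    let diff0 : List Int := List.replicate (n + 1) 0
    let diff := shifts.foldl (fun d p =>
        let start_minutes := time_to_minutes p.1
        let end_minutes := time_to_minutes p.2
        let lo : Int := hour_minutes.foldl (fun acc m => if m < start_minutes then acc + 1 else acc) 0
        let hi : Int := hour_minutes.foldl (fun acc m => if m < end_minutes then acc + 1 else acc) 0
        if lo < hi then
          let d1 := PySem.List.pySetD d lo (PySem.List.pyGetD d lo 0 + 1)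
          PySem.List.pySetD d1 hi (PySem.List.pyGetD d1 hi 0 - 1)
        else d) diff0
    let counts := ((PySem.List.pyRange 0 (n : Int) 1).foldl
        (fun (acc : List Int × Int) i =>
          let running := acc.2 + PySem.List.pyGetD diff i 0
          (acc.1 ++ [running], running)) (([] : List Int), (0 : Int))).1
    (get_operational_hours day).zip counts)
    = (get_operational_hours day).map (fun h => (h, (shifts.countP (pvCovers h) : Int))) := by
  dsimp only
  rw [pv_B_counts]
  dsimp only
  apply List.ext_getElem
  · simp
  · intro i h1 h2
    have hin : i < ((get_operational_hours day).map time_to_minutes).length := by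
      simpa using h2
    simp only [List.getElem_zip, List.getElem_map, List.getElem_range, Prod.mk.injEq]
    refine ⟨trivial, ?_⟩
    have hsum := pv_B_diff ((get_operational_hours day).map time_to_minutes)
      ((get_operational_hours day).map time_to_minutes).length rfl shifts
      (List.replicate (((get_operational_hours day).map time_to_minutes).length + 1) 0)
      (by simp) i hin
    dsimp only at hsum
    rw [hsum]
    rw [show ((List.replicate (((get_operational_hours day).map time_to_minutes).length + 1) (0 : Int)).take (i + 1)).sum = 0 by
      simp [List.take_replicate]]
    rw [zero_add]
    congr 1
    apply List.countP_congr
    intro p _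
    have h1' := pv_sorted_countP_le_iff ((get_operational_hours day).map time_to_minutes)
      (pv_hm_sorted day) i hin (time_to_minutes p.1)
    have h2' := pv_sorted_countP_le_iff ((get_operational_hours day).map time_to_minutes)
      (pv_hm_sorted day) i hin (time_to_minutes p.2)
    have hgm : ((get_operational_hours day).map time_to_minutes)[i]'hin
        = time_to_minutes ((get_operational_hours day)[i]'(by simpa using hin)) := by
      simp
    rw [hgm] at h1' h2'
    have h2'' := not_congr h2'
    rw [not_le, not_le] at h2''
    simp only [pvCovers, decide_eq_true_eq]
    exact and_congr h1' h2''

-- ===== VERDICT (by name: the statement is the Claim_ definition above) =====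
theorem calculate_hourly_coverage_spec : Claim_equal_calculate_hourly_coverage := by
  intro roster_data selected_day _
  unfold Spec_calculate_hourly_coverage calculate_hourly_coverage calculate_hourly_coverage_alt
  by_cases hg : roster_data = [] ∨ (PySem.Dict.mk roster_data).contains selected_day = false
  · simp only [if_pos hg]
  · simp only [if_neg hg]
    rw [pv_A_branch selected_day ((PySem.Dict.mk roster_data).getD selected_day [])]
    rw [← pv_B_branch selected_day ((PySem.Dict.mk roster_data).getD selected_day [])]
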